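-- pv_equiv track=rewrite | github.com/DongYun666/leetcode | 1819. 序列中不同最大公约数的数目.py | countDifferentSubsequenceGCDs
-- ===== SOURCE A (Python) =====
-- from math import gcd
-- from typing import List
--
-- def countDifferentSubsequenceGCDs(nums: List[int]) -> int:
--     mx = max(nums)
--     occur = [False] * (mx+1)
--     res = 0
--     for num in nums:
--         occur[num] = True
--     for i in range(1,mx+1):
--         g = 0
--         for j in range(i,mx+1,i):
--             if occur[j]:
--                 g = gcd(g,j)
--                 if g == i:
--                     res += 1
--                     break
--     return res
-- ===== SOURCE B (Python) =====
-- from math import gcd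
-- from typing import List
--
-- def countDifferentSubsequenceGCDs(nums: List[int]) -> int:
--     mx = max(nums)
--     g = [0] * (mx + 1)
--     for x in set(nums):
--         if x > 0:
--             d = 1
--             while d * d <= x:
--                 if x % d == 0:
--                     g[d] = gcd(g[d], x)
--                     g[x // d] = gcd(g[x // d], x)
--                 d += 1
--     return sum(1 for d in range(1, mx + 1) if g[d] == d)
-- ===== Notes on version B (the rewrite author's own statement) =====
-- stated objective: alternative
-- what changed: Replaces A's per-candidate scan over multiples (occurrence array, running gcd with early break) by the reverse nesting: one pass over the distinct elements, enumerating each element's divisors in O(sqrt x) and maintaining a per-divisor gcd table, then counting fixed points g[d] == d; Pre_ excludes inputs where A raises and inputs whose negative elements wrap around to mark an absent nonzero value in A's occur array, where A's count is an accident of the wraparound.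
-- outside the precondition, e.g. on countDifferentSubsequenceGCDs([-3, 4]): A returns 2, B returns 1
import Mathlib
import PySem

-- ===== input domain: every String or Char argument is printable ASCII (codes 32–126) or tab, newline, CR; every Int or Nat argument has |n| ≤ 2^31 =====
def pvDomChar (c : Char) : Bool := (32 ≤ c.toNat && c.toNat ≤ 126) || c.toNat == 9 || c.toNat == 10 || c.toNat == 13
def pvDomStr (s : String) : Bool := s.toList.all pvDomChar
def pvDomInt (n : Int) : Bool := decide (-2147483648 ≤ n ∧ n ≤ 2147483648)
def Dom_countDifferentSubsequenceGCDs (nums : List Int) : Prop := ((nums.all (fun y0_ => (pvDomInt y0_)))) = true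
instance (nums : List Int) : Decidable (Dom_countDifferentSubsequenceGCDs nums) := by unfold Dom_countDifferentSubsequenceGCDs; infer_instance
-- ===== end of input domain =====

-- B replaces A's per-candidate scan of multiples (with an occurrence array and early break) by a
-- per-element divisor enumeration filling a gcd table, then counts fixed points; return value only.

-- math.gcd of two ints (nonnegative result)
def pygcd (a b : Int) : Int := (Int.gcd a b : Int)

-- Python's local lists 'occur' and 'g' are ported as Lean Arrays so the ports evaluate fast;
-- pyAGetD/pyASetD reproduce Python's indexing exactly (PySem.List.pyIdx?: negative wraparound,
-- out-of-range = IndexError, here the total getD/setD-style forms used only under Pre_).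
def pyAGetD {α : Type} (xs : Array α) (i : Int) (d : α) : α :=
  ((PySem.List.pyIdx? xs.size i).bind (fun k => xs[k]?)).getD d

def pyASetD {α : Type} (xs : Array α) (i : Int) (v : α) : Array α :=
  ((PySem.List.pyIdx? xs.size i).map (fun k => xs.setIfInBounds k v)).getD xs

-- ===== PORT A =====
-- inner loop 'for j in range(i, mx+1, i): if occur[j]: g = gcd(g, j); if g == i: res += 1; break'
def innerA (occ : Array Bool) (i : Int) : List Int → Int → Int
  | [], _ => 0
  | j :: js, g =>
    if pyAGetD occ j false then
      if pygcd g j = i then 1 else innerA occ i js (pygcd g j)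
    else innerA occ i js g

def countDifferentSubsequenceGCDs (nums : List Int) : Int :=
  match PySem.List.max? nums (fun x => x) with
  | none => 0   -- max(nums) raises ValueError on empty nums; excluded by Pre_
  | some mx =>
    let occ := nums.foldl (fun o num => pyASetD o num true)
                 (Array.replicate (mx + 1).toNat false)   -- [False] * (mx+1)
    (PySem.List.pyRange 1 (mx + 1) 1).foldl
      (fun res i => res + innerA occ i (PySem.List.pyRange i (mx + 1) i) 0) 0

-- ===== PORT B =====
-- 'g[c] = gcd(g[c], x)'
def updCell (g : Array Int) (c x : Int) : Array Int :=
  pyASetD g c (pygcd (pyAGetD g c 0) x)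



-- 'while d*d <= x: if x % d == 0: g[d] = gcd(g[d], x); g[x//d] = gcd(g[x//d], x); d += 1'
def divLoop (x d : Int) (g : Array Int) : Array Int :=
  if h : d * d ≤ x then
    divLoop x (d + 1)
      (if PySem.Int.mod x d = 0 then updCell (updCell g d x) (PySem.Int.floordiv x d) x else g)
  else g
termination_by (x + 1 - d).toNat
decreasing_by
  have h1 : 2 * d - 1 ≤ x := by nlinarith [mul_self_nonneg (d - 1)]
  have h2 : (0:Int) ≤ x := le_trans (mul_self_nonneg d) h
  omega

-- iterating the Python set is safe here: the final table does not depend on the order (gcd is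
-- commutative/associative), and only the table is read afterwards
def countDifferentSubsequenceGCDs_alt (nums : List Int) : Int :=
  match PySem.List.max? nums (fun x => x) with
  | none => 0   -- max(nums) raises ValueError on empty nums; excluded by Pre_
  | some mx =>
    let g := (PySem.Set.ofList nums).foldl
               (fun acc x => if 0 < x then divLoop x 1 acc else acc)
               (Array.replicate (mx + 1).toNat 0)   -- [0] * (mx+1)
    (PySem.List.pyRange 1 (mx + 1) 1).foldl
      (fun s d => if pyAGetD g d 0 = d then s + 1 else s) 0

-- ===== PRECONDITION & SPEC =====
-- Pre_ excludes the inputs where A raises (empty nums: ValueError from max; max(nums) < 0 or an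
-- element below -(max+1): IndexError on 'occur[num]') and the inputs with a negative element whose
-- Python negative-index wraparound marks an ABSENT nonzero value in 'occur' — there A's returned
-- count is an accident of the wraparound; negative elements whose wraparound lands on index 0 or on
-- a value that is present anyway are harmless and stay inside Pre_.
def Pre_countDifferentSubsequenceGCDs (nums : List Int) : Prop :=
  nums ≠ [] ∧ (∃ x ∈ nums, 0 ≤ x) ∧
    ∀ x ∈ nums, x < 0 →
      0 ≤ nums.foldl max 0 + 1 + x ∧
        (nums.foldl max 0 + 1 + x = 0 ∨ (nums.foldl max 0 + 1 + x) ∈ nums)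
instance (nums : List Int) : Decidable (Pre_countDifferentSubsequenceGCDs nums) := by
  unfold Pre_countDifferentSubsequenceGCDs; infer_instance

def pvWitness_countDifferentSubsequenceGCDs : List Int := [6, 10, 3]

def Spec_countDifferentSubsequenceGCDs (nums : List Int) (out : Int) : Prop := out = countDifferentSubsequenceGCDs_alt nums
instance (nums : List Int) (out : Int) : Decidable (Spec_countDifferentSubsequenceGCDs nums out) := by unfold Spec_countDifferentSubsequenceGCDs; infer_instance

-- ===== CLAIM (what is proved, stated in full; the proofs are below) =====
def Claim_equal_countDifferentSubsequenceGCDs : Prop := ∀ (nums : List Int), Dom_countDifferentSubsequenceGCDs nums → Pre_countDifferentSubsequenceGCDs nums → Spec_countDifferentSubsequenceGCDs nums (countDifferentSubsequenceGCDs nums)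

-- ===== LEMMAS AND PROOFS =====

-- the gcd of all distinct positive elements of nums divisible by c (0 if none)
def gcdAll (nums : List Int) (c : Int) : Int :=
  ((PySem.Set.ofList nums).filter (fun v => decide (0 < v) && decide (c ∣ v))).foldl pygcd 0

-- list-level mirrors of the Array helpers, used only by the proofs
def updCellL (g : List Int) (c x : Int) : List Int :=
  PySem.List.pySetD g c (pygcd (PySem.List.pyGetD g c 0) x)

def divLoopL (x d : Int) (g : List Int) : List Int :=
  if h : d * d ≤ x then
    divLoopL x (d + 1)
      (if PySem.Int.mod x d = 0 then updCellL (updCellL g d x) (PySem.Int.floordiv x d) x else g)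
  else g
termination_by (x + 1 - d).toNat
decreasing_by
  have h1 : 2 * d - 1 ≤ x := by nlinarith [mul_self_nonneg (d - 1)]
  have h2 : (0:Int) ≤ x := le_trans (mul_self_nonneg d) h
  omega

theorem pygcd_rcomm (b a₁ a₂ : Int) : pygcd (pygcd b a₁) a₂ = pygcd (pygcd b a₂) a₁ := by
  simp only [pygcd, Int.gcd, Int.natAbs_natCast]
  rw [Nat.gcd_assoc, Nat.gcd_assoc, Nat.gcd_comm a₁.natAbs]

theorem pygcd_idem (a x : Int) : pygcd (pygcd a x) x = pygcd a x := by
  simp only [pygcd, Int.gcd, Int.natAbs_natCast]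
  rw [Nat.gcd_assoc, Nat.gcd_self]

theorem dvd_pygcd {i g j : Int} (hg : i ∣ g) (hj : i ∣ j) : i ∣ pygcd g j := by
  have h := Nat.dvd_gcd (Int.natAbs_dvd_natAbs.mpr hg) (Int.natAbs_dvd_natAbs.mpr hj)
  exact Int.natAbs_dvd.mp (Int.natCast_dvd_natCast.mpr h)

theorem pygcd_self_of_dvd {i j : Int} (hi : 0 < i) (hj : i ∣ j) : pygcd i j = i := by
  unfold pygcd
  rw [Int.gcd_eq_natAbs_left hj]
  omega

theorem foldl_pygcd_fixed (i : Int) (hi : 0 < i) (l : List Int) (h : ∀ j ∈ l, i ∣ j) :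
    l.foldl pygcd i = i := by
  induction l with
  | nil => rfl
  | cons j js ih =>
    simp only [List.foldl_cons, pygcd_self_of_dvd hi (h j (by simp))]
    exact ih (fun j hj => h j (by simp [hj]))

theorem pyAGetD_eq {α : Type} (xs : Array α) (i : Int) (d : α) :
    pyAGetD xs i d = PySem.List.pyGetD xs.toList i d := by
  simp [pyAGetD, PySem.List.pyGetD, PySem.List.pyGet?, Array.getElem?_toList]

theorem toList_pyASetD {α : Type} (xs : Array α) (i : Int) (v : α) :
    (pyASetD xs i v).toList = PySem.List.pySetD xs.toList i v := by
  simp only [pyASetD, PySem.List.pySetD, PySem.List.pySet?, Array.length_toList]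
  rcases h : PySem.List.pyIdx? xs.size i with _ | k
  · simp
  · simp [Array.toList_setIfInBounds]

theorem toList_updCell (g : Array Int) (c x : Int) :
    (updCell g c x).toList = updCellL g.toList c x := by
  simp [updCell, updCellL, toList_pyASetD, pyAGetD_eq]

theorem divLoop_toList (x d : Int) (g : Array Int) :
    (divLoop x d g).toList = divLoopL x d g.toList := by
  rw [divLoop, divLoopL]
  split
  · rw [divLoop_toList]
    split <;> simp [toList_updCell]
  · rfl
termination_by (x + 1 - d).toNat
decreasing_by
  rename_i h
  have h1 : 2 * d - 1 ≤ x := by nlinarith [mul_self_nonneg (d - 1)]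
  have h2 : (0:Int) ≤ x := le_trans (mul_self_nonneg d) h
  omega

theorem innerA_spec (occ : Array Bool) (i : Int) (hi : 0 < i) (js : List Int) (g : Int)
    (hdvd : ∀ j ∈ js, i ∣ j) (hg : i ∣ g) (hne : g ≠ i) :
    innerA occ i js g
      = if (js.filter (fun j => pyAGetD occ j false)).foldl pygcd g = i then 1 else 0 := by
  induction js generalizing g with
  | nil => simp [innerA, hne]
  | cons j js ih =>
    have hdj : i ∣ j := hdvd j (by simp)
    have hdvd' : ∀ v ∈ js, i ∣ v := fun v hv => hdvd v (by simp [hv])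
    rw [List.filter_cons]
    by_cases hocc : pyAGetD occ j false = true
    · simp only [innerA, hocc, if_true, List.foldl_cons]
      by_cases hgi : pygcd g j = i
      · rw [if_pos hgi, hgi,
          foldl_pygcd_fixed i hi _ (fun v hv => hdvd' v (List.mem_of_mem_filter hv)), if_pos rfl]
      · rw [if_neg hgi]
        exact ih (pygcd g j) hdvd' (dvd_pygcd hg hdj) hgi
    · have hocc' : pyAGetD occ j false = false := by simpa using hocc
      simp only [innerA, hocc', if_false, Bool.false_eq_true]
      exact ih g hdvd' hg hne

theorem pyGetD_pySetD' {α : Type} (xs : List α) (i j : Int) (v d : α)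
    (h0 : 0 ≤ i) (hi : i < (xs.length : Int)) (hj : 0 ≤ j) :
    PySem.List.pyGetD (PySem.List.pySetD xs i v) j d = if j = i then v else PySem.List.pyGetD xs j d := by
  have hi' : i.toNat < xs.length := by omega
  have h1 : i = (i.toNat : Int) := by omega
  have h2 : j = (j.toNat : Int) := by omega
  rw [h1, h2, PySem.List.pyGetD_pySetD_natCast xs i.toNat j.toNat v d hi']
  by_cases h : j.toNat = i.toNat
  · rw [if_pos h, if_pos (by omega)]
  · rw [if_neg h, if_neg (by omega)]

-- the index Python's occur[v] = True actually writes (wraparound for negative v)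
def markIdx (L v : Int) : Int := if 0 ≤ v then v else L + v

theorem pySetD_neg {α : Type} (xs : List α) (i : Int) (v : α)
    (h1 : -(xs.length : Int) ≤ i) (h2 : i < 0) :
    PySem.List.pySetD xs i v = PySem.List.pySetD xs ((((xs.length : Int) + i).toNat : Nat) : Int) v := by
  simp only [PySem.List.pySetD, PySem.List.pySet?, PySem.List.pyIdx?]
  rw [if_neg (by omega), if_pos (by omega), if_pos (by omega), if_pos (by omega)]
  have : xs.length - (-i).toNat = ((((xs.length : Int) + i).toNat : Nat) : Int).toNat := by omega
  rw [this]

theorem occ_spec (nums : List Int) (occ : List Bool) (j : Int)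
    (h0 : 0 ≤ j) (hj : j < (occ.length : Int))
    (hall : ∀ v ∈ nums, -(occ.length : Int) ≤ v ∧ v < (occ.length : Int)) :
    PySem.List.pyGetD (nums.foldl (fun o num => PySem.List.pySetD o num true) occ) j false
      = (PySem.List.pyGetD occ j false
          || decide (∃ v ∈ nums, markIdx (occ.length : Int) v = j)) := by
  induction nums generalizing occ with
  | nil => simp
  | cons v vs ih =>
    have hv := hall v (by simp)
    simp only [List.foldl_cons]
    have hstep : PySem.List.pyGetD (PySem.List.pySetD occ v true) j false
        = if j = markIdx (occ.length : Int) v then true else PySem.List.pyGetD occ j false := by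
      by_cases hv0 : 0 ≤ v
      · rw [show markIdx (occ.length : Int) v = v from if_pos hv0]
        exact pyGetD_pySetD' occ v j true false hv0 hv.2 h0
      · rw [pySetD_neg occ v true hv.1 (by omega),
          show markIdx (occ.length : Int) v = ((((occ.length : Int) + v).toNat : Nat) : Int) by
            rw [markIdx, if_neg hv0]; omega]
        exact pyGetD_pySetD' occ _ j true false (by omega) (by omega) h0
    rw [ih (PySem.List.pySetD occ v true)
        (by rw [PySem.List.length_pySetD]; exact hj)
        (fun w hw => by rw [PySem.List.length_pySetD]; exact hall w (by simp [hw]))]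
    rw [PySem.List.length_pySetD, hstep]
    by_cases hjm : j = markIdx (occ.length : Int) v
    · simp only [if_pos hjm, Bool.true_or]
      symm
      simp only [Bool.or_eq_true, decide_eq_true_eq]
      exact Or.inr ⟨v, by simp, hjm.symm⟩
    · simp only [if_neg hjm]
      congr 1
      simp only [decide_eq_decide, List.mem_cons]
      constructor
      · rintro ⟨w, hw, hwj⟩; exact ⟨w, Or.inr hw, hwj⟩
      · rintro ⟨w, hw | hw, hwj⟩
        · exact absurd hwj.symm (hw ▸ hjm)
        · exact ⟨w, hw, hwj⟩

theorem foldOcc_toList (nums : List Int) (occ : Array Bool) :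
    (nums.foldl (fun o num => pyASetD o num true) occ).toList
      = nums.foldl (fun o num => PySem.List.pySetD o num true) occ.toList := by
  induction nums generalizing occ with
  | nil => rfl
  | cons v vs ih => simp only [List.foldl_cons]; rw [ih, toList_pyASetD]

theorem foldTbl_toList (l : List Int) (g : Array Int) :
    (l.foldl (fun acc x => if 0 < x then divLoop x 1 acc else acc) g).toList
      = l.foldl (fun acc x => if 0 < x then divLoopL x 1 acc else acc) g.toList := by
  induction l generalizing g with
  | nil => rfl
  | cons x xs ih =>
    simp only [List.foldl_cons]
    rw [ih]
    by_cases hx : 0 < x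
    · simp [hx, divLoop_toList]
    · simp [hx]

theorem length_updCellL (g : List Int) (c x : Int) : (updCellL g c x).length = g.length := by
  simp [updCellL, PySem.List.length_pySetD]

theorem length_divLoopL (x d : Int) (g : List Int) : (divLoopL x d g).length = g.length := by
  rw [divLoopL]
  split
  · rw [length_divLoopL]
    split <;> simp [length_updCellL]
  · rfl
termination_by (x + 1 - d).toNat
decreasing_by
  rename_i h
  have h1 : 2 * d - 1 ≤ x := by nlinarith [mul_self_nonneg (d - 1)]
  have h2 : (0:Int) ≤ x := le_trans (mul_self_nonneg d) h
  omega

theorem divLoopL_spec (x d : Int) (hx : 0 < x) (hd : 0 < d) (g : List Int)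
    (hg : x < (g.length : Int)) (c : Int) (h0 : 0 ≤ c) :
    PySem.List.pyGetD (divLoopL x d g) c 0
      = if 0 < c ∧ c ∣ x ∧ d ≤ c ∧ c * d ≤ x then pygcd (PySem.List.pyGetD g c 0) x
        else PySem.List.pyGetD g c 0 := by
  have hcond_step : ∀ e : Int, 0 < e → e ∣ x → e ≠ d → ¬ (e * d = x) →
      ((d ≤ e ∧ e * d ≤ x) ↔ (d + 1 ≤ e ∧ e * (d + 1) ≤ x)) := by
    intro e he hex hed hedx
    constructor
    · rintro ⟨h1, h2⟩
      refine ⟨by omega, ?_⟩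
      have hk : e * (x / e) = x := Int.mul_ediv_cancel' hex
      have hdk : d ≤ x / e := by nlinarith [hk]
      have hkd : x / e ≠ d := by
        intro hh
        exact hedx (by rw [← hk, hh])
      have h4 : e * (d + 1) ≤ e * (x / e) := mul_le_mul_of_nonneg_left (by omega) (by omega)
      linarith [hk]
    · rintro ⟨h1, h2⟩
      exact ⟨by omega, by nlinarith⟩
  rw [divLoopL]
  split
  · rename_i hguard
    by_cases hdvd : PySem.Int.mod x d = 0
    · rw [if_pos hdvd]
      have hddx : d ∣ x := (PySem.Int.mod_eq_zero_iff_dvd x d).mp hdvd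
      have hq : PySem.Int.floordiv x d = x / d := PySem.Int.floordiv_eq_ediv_of_pos hd
      set q := x / d with hqdef
      rw [hq]
      have hxq : d * q = x := Int.mul_ediv_cancel' hddx
      have hq0 : 0 < q := by nlinarith
      have hdq : d ≤ q := by nlinarith
      have hqx : q ≤ x := by nlinarith
      have hdx : d ≤ x := Int.le_of_dvd hx hddx
      have hlen1 : ((updCellL g d x).length : Int) = (g.length : Int) := by
        rw [length_updCellL]
      have hlen2 : ((updCellL (updCellL g d x) q x).length : Int) = (g.length : Int) := by
        rw [length_updCellL, length_updCellL]
      rw [divLoopL_spec x (d + 1) hx (by omega) _ (by rw [hlen2]; exact hg) c h0]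
      have hGq : ∀ e : Int, 0 ≤ e →
          PySem.List.pyGetD (updCellL (updCellL g d x) q x) e 0
            = if e = q then pygcd (PySem.List.pyGetD (updCellL g d x) q 0) x
              else PySem.List.pyGetD (updCellL g d x) e 0 := by
        intro e he
        rw [updCellL]
        exact pyGetD_pySetD' _ q e _ 0 (by omega) (by rw [hlen1]; omega) he
      have hGd : ∀ e : Int, 0 ≤ e →
          PySem.List.pyGetD (updCellL g d x) e 0
            = if e = d then pygcd (PySem.List.pyGetD g d 0) x
              else PySem.List.pyGetD g e 0 := by
        intro e he
        rw [updCellL]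
        exact pyGetD_pySetD' _ d e _ 0 (by omega) (by omega) he
      by_cases hcq : c = q
      · -- cell x/d : updated now, condition at d holds, at d+1 fails unless q = d? (q*(d+1) > x)
        rw [hGq c h0, if_pos hcq, hGd q (by omega)]
        have hqdvd : q ∣ x := ⟨d, by rw [← hxq, mul_comm]⟩
        by_cases hqd : q = d
        · -- d = q : double update collapses by idempotence
          rw [if_pos hqd, hcq, hqd]
          rw [if_neg (by omega), if_pos ⟨hd, hddx, le_refl d, by nlinarith⟩]
          exact pygcd_idem _ x
        · rw [if_neg hqd, hcq]
          rw [if_neg (by rintro ⟨-, -, h1, h2⟩; nlinarith),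
              if_pos ⟨hq0, hqdvd, hdq, by nlinarith⟩]
      · rw [hGq c h0, if_neg hcq, hGd c h0]
        by_cases hcd : c = d
        · rw [if_pos hcd, hcd]
          rw [if_neg (by omega), if_pos ⟨hd, hddx, le_refl d, by nlinarith⟩]
        · rw [if_neg hcd]
          by_cases hcx : 0 < c ∧ c ∣ x
          · have hiff := hcond_step c hcx.1 hcx.2 hcd (by intro hh; exact hcq (by
              have : c = x / d := by
                rw [← hh, Int.mul_ediv_cancel _ (by omega)]
              omega))
            by_cases hc1 : d ≤ c ∧ c * d ≤ x
            · rw [if_pos ⟨hcx.1, hcx.2, hiff.mp hc1⟩, if_pos ⟨hcx.1, hcx.2, hc1⟩]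
            · rw [if_neg (by rintro ⟨-, -, h⟩; exact hc1 (hiff.mpr h)),
                  if_neg (by rintro ⟨-, -, h⟩; exact hc1 h)]
          · rw [if_neg (by rintro ⟨a, b, -⟩; exact hcx ⟨a, b⟩),
                if_neg (by rintro ⟨a, b, -⟩; exact hcx ⟨a, b⟩)]
    · rw [if_neg hdvd]
      have hndvd : ¬ d ∣ x := fun hh => hdvd ((PySem.Int.mod_eq_zero_iff_dvd x d).mpr hh)
      rw [divLoopL_spec x (d + 1) hx (by omega) g hg c h0]
      by_cases hcx : 0 < c ∧ c ∣ x
      · have hcd : c ≠ d := fun hh => hndvd (hh ▸ hcx.2)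
        have hiff := hcond_step c hcx.1 hcx.2 hcd (fun hh => hndvd ⟨c, by rw [← hh, mul_comm]⟩)
        by_cases hc1 : d ≤ c ∧ c * d ≤ x
        · rw [if_pos ⟨hcx.1, hcx.2, hiff.mp hc1⟩, if_pos ⟨hcx.1, hcx.2, hc1⟩]
        · rw [if_neg (by rintro ⟨-, -, h⟩; exact hc1 (hiff.mpr h)),
              if_neg (by rintro ⟨-, -, h⟩; exact hc1 h)]
      · rw [if_neg (by rintro ⟨a, b, -⟩; exact hcx ⟨a, b⟩),
            if_neg (by rintro ⟨a, b, -⟩; exact hcx ⟨a, b⟩)]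
  · rename_i hguard
    rw [if_neg]
    rintro ⟨hc0, -, h1, h2⟩
    exact hguard (by nlinarith)
termination_by (x + 1 - d).toNat
decreasing_by
  all_goals
    have h1 : 2 * d - 1 ≤ x := by nlinarith [mul_self_nonneg (d - 1)]
    omega

theorem tableFold_spec (l : List Int) (g : List Int)
    (hall : ∀ v ∈ l, v < (g.length : Int)) (c : Int) (hc : 0 ≤ c) :
    PySem.List.pyGetD (l.foldl (fun acc x => if 0 < x then divLoopL x 1 acc else acc) g) c 0
      = (l.filter (fun v => decide (0 < v) && decide (c ∣ v))).foldl pygcd (PySem.List.pyGetD g c 0) := by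
  induction l generalizing g with
  | nil => simp
  | cons x xs ih =>
    simp only [List.foldl_cons, List.filter_cons]
    have hrest : ∀ v ∈ xs, v < (g.length : Int) := fun v hv => hall v (by simp [hv])
    by_cases hx : 0 < x
    · rw [if_pos hx]
      have hxl : x < (g.length : Int) := hall x (by simp)
      rw [ih (divLoopL x 1 g) (fun v hv => by rw [length_divLoopL]; exact hrest v hv)]
      rw [divLoopL_spec x 1 hx one_pos g hxl c hc]
      by_cases hcx : 0 < c ∧ c ∣ x
      · have hcle : c ≤ x := Int.le_of_dvd hx hcx.2
        rw [if_pos ⟨hcx.1, hcx.2, by omega, by omega⟩]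
        simp [hx, hcx.2]
      · rw [if_neg (by rintro ⟨a, b, -⟩; exact hcx ⟨a, b⟩)]
        have : (decide (0 < x) && decide (c ∣ x)) = false := by
          by_cases hcd : c ∣ x
          · simp only [hcd, decide_true, Bool.and_true]
            simp only [decide_eq_false_iff_not]
            intro hx0
            exact hcx ⟨by
              rcases lt_trichotomy 0 c with h | h | h
              · exact h
              · exfalso; rw [← h] at hcd; rcases hcd with ⟨k, hk⟩; omega
              · exfalso; have := Int.le_of_dvd hx hcd; omega, hcd⟩
          · simp [hcd]
        rw [this]
        simp
    · rw [if_neg hx]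
      have : (decide (0 < x) && decide (c ∣ x)) = false := by simp [hx]
      rw [this]
      simp only [Bool.false_eq_true, if_false]
      exact ih g hrest

theorem lists_perm (nums : List Int) (mx i : Int) (hi : 0 < i)
    (hmax : ∀ y ∈ nums, y ≤ mx) :
    ((PySem.List.pyRange i (mx + 1) i).filter (fun j => decide (j ∈ nums))).Perm
      ((PySem.Set.ofList nums).filter (fun v => decide (0 < v) && decide (i ∣ v))) := by
  have hnodupA : (PySem.List.pyRange i (mx + 1) i).Nodup := by
    rw [PySem.List.pyRange_of_pos _ _ hi]
    apply List.Nodup.map ?_ (List.nodup_range)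
    intro a b hab
    have hab' : i + i * (a : Int) = i + i * (b : Int) := hab
    have h1 : i * (a : Int) = i * (b : Int) := by omega
    have h2 : (a : Int) = b := mul_left_cancel₀ (by omega) h1
    omega
  rw [List.perm_ext_iff_of_nodup (hnodupA.filter _) ((PySem.Set.nodup_ofList nums).filter _)]
  intro a
  simp only [List.mem_filter, PySem.List.mem_pyRange_iff_of_pos hi, PySem.Set.mem_ofList,
    Bool.and_eq_true, decide_eq_true_eq]
  constructor
  · rintro ⟨⟨h1, h2, h3⟩, h4⟩
    refine ⟨h4, by omega, ?_⟩
    have : i ∣ (a - i) + i := Int.dvd_add h3 (dvd_refl i)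
    simpa using this
  · rintro ⟨h1, h2, h3⟩
    have hle : i ≤ a := Int.le_of_dvd h2 h3
    have hamx : a ≤ mx := hmax a h1
    exact ⟨⟨hle, by omega, (Int.dvd_sub h3 (dvd_refl i))⟩, h1⟩

theorem pyGetD_replicate {α : Type} (n : Nat) (a : α) (j : Int) (hj : 0 ≤ j) :
    PySem.List.pyGetD (List.replicate n a) j a = a := by
  rw [PySem.List.pyGetD_of_nonneg _ _ hj]
  by_cases h : j.toNat < n
  · exact List.getD_replicate a h
  · rw [List.getD_eq_default]; simp; omega

theorem countDifferentSubsequenceGCDs_spec : Claim_equal_countDifferentSubsequenceGCDs := by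
  intro nums _ hpre
  obtain ⟨hne, hex, hmarks⟩ := hpre
  unfold Spec_countDifferentSubsequenceGCDs countDifferentSubsequenceGCDs
    countDifferentSubsequenceGCDs_alt
  rcases hmx : PySem.List.max? nums (fun x => x) with _ | mx
  · rfl
  · dsimp only
    have hmem : mx ∈ nums := PySem.List.max?_mem hmx
    have hmax : ∀ y ∈ nums, y ≤ mx := fun y hy => PySem.List.max?_isMax hmx y hy
    have hmx0 : 0 ≤ mx := by
      obtain ⟨x, hx, hx0⟩ := hex
      exact le_trans hx0 (hmax x hx)
    have hF : nums.foldl max 0 = mx := by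
      obtain ⟨h1, h2⟩ := PySem.List.le_foldl_max nums 0
      rcases PySem.List.foldl_max_mem nums 0 with h | h
      · have := h2 mx hmem
        omega
      · have := hmax _ h
        have := h2 mx hmem
        omega
    rw [hF] at hmarks
    have hcast : (((mx + 1).toNat : Nat) : Int) = mx + 1 := by omega
    set occ := nums.foldl (fun o num => pyASetD o num true)
        (Array.replicate (mx + 1).toNat false) with hoccdef
    set tbl := (PySem.Set.ofList nums).foldl (fun acc x => if 0 < x then divLoop x 1 acc else acc)
        (Array.replicate (mx + 1).toNat 0) with htbldef
    have hoccget : ∀ j : Int, 1 ≤ j → j < mx + 1 → pyAGetD occ j false = decide (j ∈ nums) := by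
      intro j h0 hj
      have hlrep : (((List.replicate (mx + 1).toNat false).length : Nat) : Int) = mx + 1 := by
        rw [List.length_replicate, hcast]
      rw [pyAGetD_eq, hoccdef, foldOcc_toList, Array.toList_replicate,
        occ_spec nums _ j (by omega) (by omega)
        (fun v hv => by
          rw [hlrep]
          refine ⟨?_, by have := hmax v hv; omega⟩
          by_cases hv0 : 0 ≤ v
          · omega
          · have := (hmarks v hv (by omega)).1; omega)]
      rw [pyGetD_replicate _ _ _ (by omega), Bool.false_or, hlrep]
      simp only [decide_eq_decide]
      constructor
      · rintro ⟨v, hv, hvj⟩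
        by_cases hv0 : 0 ≤ v
        · rw [markIdx, if_pos hv0] at hvj
          exact hvj ▸ hv
        · rw [markIdx, if_neg hv0] at hvj
          rcases (hmarks v hv (by omega)).2 with h | h
          · omega
          · have : mx + 1 + v = j := by omega
            exact this ▸ h
      · intro hjn
        exact ⟨j, hjn, if_pos (by omega)⟩
    have htblget : ∀ d : Int, 0 ≤ d → d < mx + 1 → pyAGetD tbl d 0 = gcdAll nums d := by
      intro d h0 hd
      rw [pyAGetD_eq, htbldef, foldTbl_toList, Array.toList_replicate, tableFold_spec _ _
        (fun v hv => by rw [List.length_replicate, hcast]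
                        have := hmax v ((PySem.Set.mem_ofList nums v).mp hv); omega) d h0]
      rw [pyGetD_replicate _ _ _ h0]
      rfl
    have hA : ∀ (res : Int), ∀ i ∈ PySem.List.pyRange 1 (mx + 1) 1,
        res + innerA occ i (PySem.List.pyRange i (mx + 1) i) 0
          = if gcdAll nums i = i then res + 1 else res := by
      intro res i him
      have hi := PySem.List.mem_pyRange_one.mp him
      have hdvd : ∀ j ∈ PySem.List.pyRange i (mx + 1) i, i ∣ j := by
        intro j hj
        rw [PySem.List.mem_pyRange_iff_of_pos (by omega)] at hj
        have : i ∣ (j - i) + i := Int.dvd_add hj.2.2 (dvd_refl i)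
        simpa using this
      rw [innerA_spec occ i (by omega) _ 0 hdvd (dvd_zero i) (by omega)]
      have hfc : (PySem.List.pyRange i (mx + 1) i).filter (fun j => pyAGetD occ j false)
          = (PySem.List.pyRange i (mx + 1) i).filter (fun j => decide (j ∈ nums)) := by
        apply List.filter_congr
        intro j hj
        rw [PySem.List.mem_pyRange_iff_of_pos (by omega)] at hj
        exact hoccget j (by omega) hj.2.1
      rw [hfc]
      rw [List.Perm.foldl_eq (rcomm := ⟨pygcd_rcomm⟩)
        (lists_perm nums mx i (by omega) hmax) 0]
      have : ((PySem.Set.ofList nums).filter (fun v => decide (0 < v) && decide (i ∣ v))).foldl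
          pygcd 0 = gcdAll nums i := rfl
      rw [this]
      split <;> ring
    have hB : ∀ (s : Int), ∀ d ∈ PySem.List.pyRange 1 (mx + 1) 1,
        (if pyAGetD tbl d 0 = d then s + 1 else s)
          = if gcdAll nums d = d then s + 1 else s := by
      intro s d hd
      have h := PySem.List.mem_pyRange_one.mp hd
      rw [htblget d (by omega) h.2]
    rw [PySem.List.foldl_congr_mem _ _ (fun res i => if gcdAll nums i = i then res + 1 else res) 0 hA,
        PySem.List.foldl_congr_mem _ _ (fun s d => if gcdAll nums d = d then s + 1 else s) 0 hB]
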